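-- pv_equiv track=rewrite | github.com/robertlugg/easygui | easygui/boxes/button_box_choices.py | uniquify_list_of_strings
-- ===== SOURCE A (Python) =====
-- def uniquify_list_of_strings(input_list):
--     """
--     Ensure that every string within input_list is unique.
--     :param list input_list: List of strings
--     :return: New list with unique names as needed.
--     """
--     output_list = list()
--     for i, item in enumerate(input_list):
--         tempList = input_list[:i] + input_list[i + 1:]
--         if item not in tempList:
--             output_list.append(item)
--         else:
--             output_list.append('{0}_{1}'.format(item, i))
--     return output_list
-- ===== SOURCE B (Python) =====
-- def uniquify_list_of_strings(input_list):
--     """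
--     Ensure that every string within input_list is unique.
--     :param list input_list: List of strings
--     :return: New list with unique names as needed.
--     """
--     counts = {}
--     for item in input_list:
--         counts[item] = counts.get(item, 0) + 1
--     return ['{0}_{1}'.format(item, i) if counts[item] > 1 else item
--             for i, item in enumerate(input_list)]
-- ===== Notes on version B (the rewrite author's own statement) =====
-- stated objective: faster
-- what changed: B builds a single occurrence-count dict in one pass and then maps over enumerate, instead of rebuilding the rest-of-list slice and scanning it for each element.
import Mathlib
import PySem

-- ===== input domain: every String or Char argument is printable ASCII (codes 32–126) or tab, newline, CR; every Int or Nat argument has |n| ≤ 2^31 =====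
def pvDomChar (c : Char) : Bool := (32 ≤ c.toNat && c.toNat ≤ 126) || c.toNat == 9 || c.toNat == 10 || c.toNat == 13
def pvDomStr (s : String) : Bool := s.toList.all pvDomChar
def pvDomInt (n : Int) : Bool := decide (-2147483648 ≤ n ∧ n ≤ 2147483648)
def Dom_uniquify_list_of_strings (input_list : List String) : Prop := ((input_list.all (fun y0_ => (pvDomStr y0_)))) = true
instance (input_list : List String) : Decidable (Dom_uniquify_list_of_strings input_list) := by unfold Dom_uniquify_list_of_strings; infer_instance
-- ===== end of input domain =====

-- B replaces A's per-element rest-of-list scan with one counting pass plus a map (faster).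

-- ===== PORT A =====
def uniquify_list_of_strings (input_list : List String) : List String :=
  (PySem.List.enumerate input_list).foldl (fun output_list p =>
    let tempList := PySem.List.slice input_list none (some p.1) ++
                    PySem.List.slice input_list (some (p.1 + 1)) none
    if p.2 ∉ tempList then output_list ++ [p.2]
    else output_list ++ [p.2 ++ "_" ++ PySem.Int.toStr p.1]) []

-- ===== PORT B =====
def uniquify_list_of_strings_alt (input_list : List String) : List String :=
  let counts := input_list.foldl (fun d item => d.insert item (d.getD item 0 + 1))
    (PySem.Dict.empty : PySem.Dict String Int)
  (PySem.List.enumerate input_list).map (fun p =>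
    if counts.getD p.2 0 > 1 then p.2 ++ "_" ++ PySem.Int.toStr p.1 else p.2)

-- ===== PRECONDITION & SPEC =====
def Spec_uniquify_list_of_strings (input_list : List String) (out : List String) : Prop := out = uniquify_list_of_strings_alt input_list
instance (input_list : List String) (out : List String) : Decidable (Spec_uniquify_list_of_strings input_list out) := by unfold Spec_uniquify_list_of_strings; infer_instance

-- ===== CLAIM (what is proved, stated in full; the proofs are below) =====
def Claim_equal_uniquify_list_of_strings : Prop := ∀ (input_list : List String), Dom_uniquify_list_of_strings input_list → Spec_uniquify_list_of_strings input_list (uniquify_list_of_strings input_list)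

-- ===== LEMMAS AND PROOFS =====

-- A's append-only loop is the map of its per-element value.
theorem foldl_append_ite {α β : Type} (c : α → Prop) [DecidablePred c] (f g : α → β) :
    ∀ (L : List α) (init : List β),
      L.foldl (fun out x => if c x then out ++ [f x] else out ++ [g x]) init
        = init ++ L.map (fun x => if c x then f x else g x) := by
  intro L
  induction L with
  | nil => simp
  | cons a L ih =>
      intro init
      by_cases h : c a <;> simp [List.foldl_cons, ih, h]

-- the element at index k is in the rest of the list iff it occurs more than once
theorem mem_erase_at_iff_count (l : List String) (k : Nat) (hk : k < l.length) :
    l[k] ∈ l.take k ++ l.drop (k + 1) ↔ 1 < l.count l[k] := by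
  have hsplit : l.count l[k] = (l.take k).count l[k] + (l.drop k).count l[k] := by
    rw [← List.count_append, List.take_append_drop]
  have hd : l.drop k = l[k] :: l.drop (k + 1) := List.drop_eq_getElem_cons hk
  rw [hd] at hsplit
  simp only [List.count_cons_self] at hsplit
  constructor
  · intro hmem
    rcases List.mem_append.mp hmem with h | h
    · have := List.count_pos_iff.mpr h; omega
    · have := List.count_pos_iff.mpr h; omega
  · intro hlt
    have : 0 < (l.take k).count l[k] ∨ 0 < (l.drop (k + 1)).count l[k] := by omega
    rcases this with h | h
    · exact List.mem_append.mpr (Or.inl (List.count_pos_iff.mp h))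
    · exact List.mem_append.mpr (Or.inr (List.count_pos_iff.mp h))

-- ===== VERDICT (by name: the statement is the Claim_ definition above) =====
theorem uniquify_list_of_strings_spec : Claim_equal_uniquify_list_of_strings := by
  intro l _
  unfold Spec_uniquify_list_of_strings uniquify_list_of_strings uniquify_list_of_strings_alt
  rw [foldl_append_ite (fun p : Int × String =>
        p.2 ∉ PySem.List.slice l none (some p.1) ++ PySem.List.slice l (some (p.1 + 1)) none)]
  simp only [List.nil_append]
  apply List.map_congr_left
  intro p hp
  rcases (PySem.List.mem_enumerate_iff l 0 p).mp hp with ⟨k, hk, rfl⟩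
  simp only [Int.zero_add]
  have hcast : ((k : Int) + 1) = ((k + 1 : Nat) : Int) := by push_cast; ring
  rw [hcast, PySem.List.slice_to_natCast, PySem.List.slice_from_natCast]
  have hcnt :
      (PySem.Dict.counter l).getD l[k] 0 = (l.count l[k] : Int) := PySem.Dict.getD_counter l l[k]
  rw [PySem.Dict.foldl_insert_getD_add_one_eq_counter, hcnt]
  have hmem := mem_erase_at_iff_count l k hk
  by_cases h : l[k] ∈ l.take k ++ l.drop (k + 1)
  · have : 1 < l.count l[k] := hmem.mp h
    simp [h, this]
  · have : ¬ 1 < l.count l[k] := fun hc => h (hmem.mpr hc)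
    simp only [h, not_false_eq_true, if_true]
    rw [if_neg (by exact_mod_cast this)]
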